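-- pv_equiv track=rewrite | github.com/abrarimon14/My-python-programs | test3.py | cleanedup
-- ===== SOURCE A (Python) =====
-- def cleanedup(s):
--     forCleaning = '@abcdefghijklmnopqrstuvwxyz'
--     cleantext = ''
--     for character in s.lower():
--         if character in forCleaning:
--             cleantext += character
--         else:
--             cleantext += ' '
--     return cleantext
-- ===== SOURCE B (Python) =====
-- import re
--
-- def cleanedup(s):
--     return re.sub(r'[^@a-z]', ' ', s.lower())
-- ===== Notes on version B (the rewrite author's own statement) =====
-- stated objective: idiomatic
-- what changed: Replaces the explicit per-character loop accumulating into a string with a single regex substitution re.sub on s.lower(), letting the regex engine classify characters by a range test instead of membership in a literal keep-string.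
import Mathlib
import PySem

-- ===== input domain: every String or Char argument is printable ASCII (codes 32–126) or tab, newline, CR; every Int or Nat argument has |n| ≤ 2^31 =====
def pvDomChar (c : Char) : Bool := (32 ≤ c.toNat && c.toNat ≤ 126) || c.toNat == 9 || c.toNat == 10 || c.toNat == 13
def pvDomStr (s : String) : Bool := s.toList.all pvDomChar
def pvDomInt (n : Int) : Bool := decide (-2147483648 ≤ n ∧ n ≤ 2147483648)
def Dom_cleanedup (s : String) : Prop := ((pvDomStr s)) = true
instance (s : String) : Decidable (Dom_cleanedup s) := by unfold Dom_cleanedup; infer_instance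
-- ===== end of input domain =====

-- B replaces A's explicit accumulate-into-a-string loop by a single regex substitution
-- re.sub(r'[^@a-z]', ' ', s.lower()) — same return value (objective: idiomatic).

-- ===== PORT A =====
-- literal port of A: loop over s.lower(), membership test in the keep-string, append char or space
def cleanedup (s : String) : String :=
  String.ofList
    ((PySem.Chars.lower s.toList).foldl
      (fun cleantext character =>
        if "@abcdefghijklmnopqrstuvwxyz".toList.contains character then
          cleantext ++ [character]
        else
          cleantext ++ [' '])
      [])

-- ===== PORT B =====
-- port of B: re.sub(r'[^@a-z]', ' ', s.lower()); the regex engine replaces every char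
-- outside the class [@a-z] (a range test) by ' ', i.e. a map over the chars — exact on Dom (ASCII)
def cleanedup_alt (s : String) : String :=
  String.ofList
    ((PySem.Chars.lower s.toList).map
      (fun c => if c == '@' || ('a' ≤ c && c ≤ 'z') then c else ' '))

-- ===== PRECONDITION & SPEC =====
def Spec_cleanedup (s : String) (out : String) : Prop := out = cleanedup_alt s
instance (s : String) (out : String) : Decidable (Spec_cleanedup s out) := by unfold Spec_cleanedup; infer_instance

-- ===== CLAIM (what is proved, stated in full; the proofs are below) =====
def Claim_equal_cleanedup : Prop := ∀ (s : String), Dom_cleanedup s → Spec_cleanedup s (cleanedup s)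

-- ===== LEMMAS AND PROOFS =====

-- membership in A's literal keep-string agrees with B's character-class range test
theorem keepset_eq_range (c : Char) :
    "@abcdefghijklmnopqrstuvwxyz".toList.contains c
      = (c == '@' || ('a' ≤ c && c ≤ 'z')) := by
  rw [show "@abcdefghijklmnopqrstuvwxyz".toList =
    ['@','a','b','c','d','e','f','g','h','i','j','k','l','m','n','o','p','q','r','s','t','u','v','w','x','y','z'] from by decide,
    Bool.eq_iff_iff]
  rcases c with ⟨v, hv⟩
  simp only [List.contains_cons, List.contains_nil,
    Bool.or_eq_true, beq_iff_eq, Bool.and_eq_true, decide_eq_true_eq, Char.ext_iff, Char.le_def,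
    UInt32.le_iff_toNat_le, ← UInt32.toNat_inj, Bool.or_false, show ('@'.val.toNat)=64 from rfl, show ('a'.val.toNat)=97 from rfl, show ('b'.val.toNat)=98 from rfl, show ('c'.val.toNat)=99 from rfl, show ('d'.val.toNat)=100 from rfl, show ('e'.val.toNat)=101 from rfl, show ('f'.val.toNat)=102 from rfl, show ('g'.val.toNat)=103 from rfl, show ('h'.val.toNat)=104 from rfl, show ('i'.val.toNat)=105 from rfl, show ('j'.val.toNat)=106 from rfl, show ('k'.val.toNat)=107 from rfl, show ('l'.val.toNat)=108 from rfl, show ('m'.val.toNat)=109 from rfl, show ('n'.val.toNat)=110 from rfl, show ('o'.val.toNat)=111 from rfl, show ('p'.val.toNat)=112 from rfl, show ('q'.val.toNat)=113 from rfl, show ('r'.val.toNat)=114 from rfl, show ('s'.val.toNat)=115 from rfl, show ('t'.val.toNat)=116 from rfl, show ('u'.val.toNat)=117 from rfl, show ('v'.val.toNat)=118 from rfl, show ('w'.val.toNat)=119 from rfl, show ('x'.val.toNat)=120 from rfl, show ('y'.val.toNat)=121 from rfl, show ('z'.val.toNat)=122 from rfl]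
  omega

-- A's fold, started from any accumulator, appends the mapped characters
theorem fold_eq_map (l acc : List Char) :
    l.foldl (fun cleantext character =>
        if "@abcdefghijklmnopqrstuvwxyz".toList.contains character then
          cleantext ++ [character]
        else
          cleantext ++ [' ']) acc
      = acc ++ l.map (fun c => if c == '@' || ('a' ≤ c && c ≤ 'z') then c else ' ') := by
  induction l generalizing acc with
  | nil => simp
  | cons c t ih =>
    rw [List.foldl_cons, List.map_cons]
    by_cases h : ("@abcdefghijklmnopqrstuvwxyz".toList.contains c) = true
    · rw [if_pos h, ih, if_pos (by rw [← keepset_eq_range]; exact h)]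
      simp
    · rw [if_neg h, ih, if_neg (by rw [← keepset_eq_range]; exact h)]
      simp

-- ===== VERDICT (by name: the statement is the Claim_ definition above) =====
theorem cleanedup_spec : Claim_equal_cleanedup := by
  intro s _
  unfold Spec_cleanedup cleanedup cleanedup_alt
  rw [fold_eq_map]
  simp
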